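-- pv_equiv track=rewrite | github.com/WonyJeong/algorithm-study | WonyJeong/programmers/2018kakao-1/friendsFourBlock.py | solution
-- ===== SOURCE A (Python) =====
-- def rematchBoard(board):
--     temp = list(map(list, zip(*board)))
--     for i in range(len(temp)):
--         ct = 0
--         while "X" in temp[i]:
--             temp[i].remove("X")
--             ct += 1
--
--         for j in range(ct):
--             temp[i].insert(0, "X")
--
--     return list(map(list, zip(*temp)))
--
-- def blockMarking(blocks, board):
--     for i, j in blocks:
--         board[i][j] = "X"
--     return rematchBoard(board)
--
-- def solution(m, n, board):
--     answer = 0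
--     flag = True
--     for i in range(m):
--         board[i] = list(map(str, board[i]))
--
--     while flag:
--         flag = False
--         removedBlock = set()
--         for i in range(m - 1):
--             for j in range(n - 1):
--                 if (
--                     board[i][j] != "X"
--                     and board[i][j] == board[i][j + 1]
--                     and board[i][j] == board[i + 1][j]
--                     and board[i][j] == board[i + 1][j + 1]
--                 ):
--                     flag = True
--                     removedBlock.add(tuple([i, j]))
--                     removedBlock.add(tuple([i, j + 1]))
--                     removedBlock.add(tuple([i + 1, j]))
--                     removedBlock.add(tuple([i + 1, j + 1]))
--
--         if flag == True:
--             answer += len(removedBlock)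
--             board = blockMarking(removedBlock, board)
--
--     return answer
-- ===== SOURCE B (Python) =====
-- def _cascade(m, n, cols):
--     # cols[j] holds column j bottom-up (index 0 = bottom row m-1); empty space is implicit.
--     def at(i, j):
--         k = m - 1 - i
--         return cols[j][k] if k < len(cols[j]) else None
--
--     def doomed(i, j):
--         c = at(i, j)
--         return c is not None and any(
--             at(a, b) == at(a, b + 1) == at(a + 1, b) == at(a + 1, b + 1) == c
--             for a in (i - 1, i) for b in (j - 1, j)
--             if 0 <= a < m - 1 and 0 <= b < n - 1)
--
--     marked = [[doomed(i, j) for j in range(n)] for i in range(m)]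
--     removed = sum(map(sum, marked))
--     if removed == 0:
--         return 0
--     new_cols = ["".join(c for k, c in enumerate(cols[j]) if not marked[m - 1 - k][j])
--                 for j in range(n)]
--     return removed + _cascade(m, n, new_cols)
--
--
-- def solution(m, n, board):
--     cols = ["".join(col) for col in zip(*(board[i][:n] for i in range(m - 1, -1, -1)))]
--     return _cascade(m, n, cols)
-- ===== Notes on version B (the rewrite author's own statement) =====
-- stated objective: alternative
-- what changed: Inverts the scan: instead of A's while-loop that iterates over 2x2 windows accumulating a removed-set and then does gravity by transpose/remove-X/re-insert on an X-sentinel grid, B recurses on immutable bottom-up column strings, classifies each CELL by testing the up-to-four windows covering it (no set, no flag, no sentinel), counts removals by summing the boolean mark grid, and applies gravity as a per-column filter of unmarked cells.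
-- outside the precondition, e.g. on solution(2, 2, ['XX', 'XX']): A returns 0, B returns 4; on solution(1, 2, ['', 'a']): A returns 0, B raises IndexError; on solution(2, 2, ['aa', 'aab']): A returns 4, B returns 4
import Mathlib
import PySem

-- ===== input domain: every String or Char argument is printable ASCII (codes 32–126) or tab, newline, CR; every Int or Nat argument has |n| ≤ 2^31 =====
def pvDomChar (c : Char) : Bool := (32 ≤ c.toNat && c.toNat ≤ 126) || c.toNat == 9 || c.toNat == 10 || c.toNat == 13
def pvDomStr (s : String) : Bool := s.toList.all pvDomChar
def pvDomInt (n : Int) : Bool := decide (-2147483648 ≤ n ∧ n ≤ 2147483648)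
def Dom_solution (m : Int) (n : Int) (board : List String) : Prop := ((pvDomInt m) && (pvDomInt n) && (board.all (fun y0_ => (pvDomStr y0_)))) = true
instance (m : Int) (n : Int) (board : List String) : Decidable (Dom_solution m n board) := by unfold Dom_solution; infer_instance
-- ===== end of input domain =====

-- B replaces A's window-scan-into-a-set plus X-sentinel transpose/remove/re-insert gravity
-- by a recursion on bottom-up column strings that classifies each cell by the windows
-- covering it and filters the doomed cells out of its column; equivalence is about the
-- RETURN value only — Python A mutates its 'board' argument, B does not.

-- ===== PORT A =====

-- board[i][j] read; exact whenever (i, j) is in range, which holds at every use under Pre_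
def pvCellA (b : List (List Char)) (i j : Int) : Char :=
  (PySem.List.pyGet? ((PySem.List.pyGet? b i).getD []) j).getD '?'

-- zip(*rows): the builtin, ported by its contract (transpose truncated to the shortest row)
def pvZipT (rows : List (List Char)) : List (List Char) :=
  match rows with
  | [] => []
  | r :: rs =>
    let k := rs.foldl (fun acc t => min acc t.length) r.length
    (List.range k).map (fun j => (r :: rs).map (fun t => t.getD j '?'))

-- the `while "X" in temp[i]: temp[i].remove("X"); ct += 1` loop
def pvStripX (l : List Char) (ct : Nat) : List Char × Nat :=
  if h : 'X' ∈ l then pvStripX (l.erase 'X') (ct + 1) else (l, ct)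
termination_by l.length
decreasing_by
  have := List.length_erase_of_mem h
  have : l ≠ [] := by rintro rfl; simp at h
  have : 0 < l.length := List.length_pos_iff.mpr this
  simp [List.length_erase_of_mem h]; omega

-- per-column body of rematchBoard: strip the X's, then `for j in range(ct): insert(0, "X")`
def pvDropCol (col : List Char) : List Char :=
  let p := pvStripX col 0
  (List.range p.2).foldl (fun acc _ => 'X' :: acc) p.1

def rematchBoard (board : List (List Char)) : List (List Char) :=
  pvZipT ((pvZipT board).map pvDropCol)

-- board[i][j] = "X"; i, j are nonnegative and in range at every call site (scan coordinates)
def pvMark (b : List (List Char)) (i j : Int) : List (List Char) :=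
  b.set i.toNat ((b.getD i.toNat []).set j.toNat 'X')

def blockMarking (blocks : List (Int × Int)) (board : List (List Char)) : List (List Char) :=
  rematchBoard (blocks.foldl (fun b p => pvMark b p.1 p.2) board)

def pvScan (m n : Int) (b : List (List Char)) : Bool × PySem.Set (Int × Int) :=
  (PySem.List.pyRange 0 (m - 1)).foldl (fun st i =>
    (PySem.List.pyRange 0 (n - 1)).foldl (fun st j =>
      if pvCellA b i j ≠ 'X' ∧ pvCellA b i j = pvCellA b i (j + 1) ∧
         pvCellA b i j = pvCellA b (i + 1) j ∧ pvCellA b i j = pvCellA b (i + 1) (j + 1)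
      then (true, ((((st.2.add (i, j)).add (i, j + 1)).add (i + 1, j)).add (i + 1, j + 1)))
      else st) st) (false, PySem.Set.empty)

-- the `while flag` loop; fuel m*n+1 bounds the number of iterations (each round with
-- matches turns at least one live cell into 'X', and the m×n window has m*n cells)
def pvLoopA (m n : Int) : Nat → List (List Char) → Int → Int
  | 0, _, answer => answer
  | fuel + 1, board, answer =>
    let st := pvScan m n board
    if st.1 then pvLoopA m n fuel (blockMarking st.2 board) (answer + PySem.Set.len st.2)
    else answer

def solution (m : Int) (n : Int) (board : List String) : Int :=
  -- `for i in range(m): board[i] = list(map(str, board[i]))`: exact when m = len(board) (Pre_)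
  pvLoopA m n (m.toNat * n.toNat + 1) (board.map String.toList) 0

-- ===== PORT B =====

-- cols[j][m-1-i] if m-1-i < len(cols[j]) else None
def altAt (m : Int) (cols : List (List Char)) (i j : Int) : Option Char :=
  let col := (PySem.List.pyGet? cols j).getD []
  if m - 1 - i < (col.length : Int) then PySem.List.pyGet? col (m - 1 - i) else none

-- `c is not None and any(at(a,b)==at(a,b+1)==at(a+1,b)==at(a+1,b+1)==c for a … for b … if bounds)`
def altDoomed (m n : Int) (cols : List (List Char)) (i j : Int) : Bool :=
  match altAt m cols i j with
  | none => false
  | some c =>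
    [i - 1, i].any (fun a => [j - 1, j].any (fun b =>
      decide (0 ≤ a) && decide (a < m - 1) && decide (0 ≤ b) && decide (b < n - 1) &&
      (altAt m cols a b == altAt m cols a (b + 1)) &&
      (altAt m cols a (b + 1) == altAt m cols (a + 1) b) &&
      (altAt m cols (a + 1) b == altAt m cols (a + 1) (b + 1)) &&
      (altAt m cols (a + 1) (b + 1) == some c)))

def altMarked (m n : Int) (cols : List (List Char)) : List (List Bool) :=
  (PySem.List.pyRange 0 m).map (fun i =>
    (PySem.List.pyRange 0 n).map (fun j => altDoomed m n cols i j))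

-- sum(map(sum, marked)) — booleans summed as ints
def altRemoved (marked : List (List Bool)) : Int :=
  (marked.map (fun row => (row.map (fun b => if b then (1 : Int) else 0)).sum)).sum

-- marked[m-1-k][j] read; exact at every use (indices in range under the column invariant)
def altMarkAt (marked : List (List Bool)) (i j : Int) : Bool :=
  (PySem.List.pyGet? ((PySem.List.pyGet? marked i).getD []) j).getD false

def altNewCols (m n : Int) (marked : List (List Bool)) (cols : List (List Char)) :
    List (List Char) :=
  (PySem.List.pyRange 0 n).map (fun j =>
    (PySem.List.enumerate ((PySem.List.pyGet? cols j).getD [])).filterMap (fun kc =>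
      if altMarkAt marked (m - 1 - kc.1) j then none else some kc.2))

-- _cascade; the fuel is a totality guard only (each recursive call removes ≥ 1 of the
-- ≤ m*n cells, so m*n+1 rounds are never exhausted)
def altCascade (m n : Int) : Nat → List (List Char) → Int
  | 0, _ => 0
  | fuel + 1, cols =>
    let marked := altMarked m n cols
    let removed := altRemoved marked
    if removed = 0 then 0
    else removed + altCascade m n fuel (altNewCols m n marked cols)

def solution_alt (m : Int) (n : Int) (board : List String) : Int :=
  -- cols = ["".join(col) for col in zip(*(board[i][:n] for i in range(m-1,-1,-1)))]
  -- zip(*rows), the builtin, is ported by its contract (pvZipT); slices are PySem.List.slice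
  let cols := pvZipT ((PySem.List.pyRange (m - 1) (-1) (-1)).map (fun i =>
    PySem.List.slice ((PySem.List.pyGet? board i).getD "").toList none (some n)))
  altCascade m n (m.toNat * n.toNat + 1) cols

-- ===== PRECONDITION & SPEC =====

-- the cell at window position (a, b), and "the m×n window has no monochrome 2×2 block"
def pvBCell (board : List String) (a b : Nat) : Char := ((board.getD a "").toList).getD b '?'

def pvNoMatch (m n : Int) (board : List String) : Prop :=
  ∀ i < (m - 1).toNat, ∀ j < (n - 1).toNat,
    ¬ (pvBCell board i j = pvBCell board i (j + 1) ∧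
       pvBCell board i j = pvBCell board (i + 1) j ∧
       pvBCell board i j = pvBCell board (i + 1) (j + 1))

-- Pre_ admits (a) exact m×n grids containing no 'X' — the game's proper inputs — and
-- (b) any in-bounds board whose m×n window has no monochrome 2×2 block (no round fires).
-- Excluded: boards whose shape disagrees with m,n while a match exists (A usually raises
-- IndexError there, and its whole-board transpose gravity drags cells outside the m×n
-- window into play), and boards containing the reserved character 'X' while a match
-- exists — 'X' is A's own in-band marker for removed cells, so whether such an input cell
-- is a live block or an empty hole is unspecified and either reading is defensible.
def Pre_solution (m : Int) (n : Int) (board : List String) : Prop :=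
  ((board.length : Int) = m ∧ (∀ r ∈ board, (r.toList.length : Int) = n) ∧
    (∀ r ∈ board, 'X' ∉ r.toList))
  ∨ (m ≤ (board.length : Int) ∧ (∀ r ∈ board.take m.toNat, n ≤ (r.toList.length : Int)) ∧
    pvNoMatch m n board)

instance (m : Int) (n : Int) (board : List String) : Decidable (Pre_solution m n board) := by
  unfold Pre_solution pvNoMatch; infer_instance

def pvWitness_solution : Int × Int × List String := (2, 2, ["ab", "cd"])

def Spec_solution (m : Int) (n : Int) (board : List String) (out : Int) : Prop :=
  out = solution_alt m n board
instance (m : Int) (n : Int) (board : List String) (out : Int) :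
    Decidable (Spec_solution m n board out) := by unfold Spec_solution; infer_instance

-- ===== CLAIM (what is proved, stated in full; the proofs are below) =====
def Claim_equal_solution : Prop := ∀ (m : Int) (n : Int) (board : List String),
  Dom_solution m n board → Pre_solution m n board → Spec_solution m n board (solution m n board)

-- ===== LEMMAS AND PROOFS =====

-- proof-side notions: A's scan as a pure set fold over the top-down column view, the
-- top-down survivor step, shape of a grid, the rendering of columns as A's grid
def pvAltCell (m : Int) (cols : List (List Char)) (i j : Int) : Option Char :=
  let col := (PySem.List.pyGet? cols j).getD []
  let off := m - (col.length : Int)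
  if off ≤ i then PySem.List.pyGet? col (i - off) else none

def pvAltScan (m n : Int) (cols : List (List Char)) : PySem.Set (Int × Int) :=
  (PySem.List.pyRange 0 (m - 1)).foldl (fun s i =>
    (PySem.List.pyRange 0 (n - 1)).foldl (fun s j =>
      let c := pvAltCell m cols i j
      if c.isSome ∧ c = pvAltCell m cols i (j + 1) ∧
         c = pvAltCell m cols (i + 1) j ∧ c = pvAltCell m cols (i + 1) (j + 1)
      then ((((s.add (i, j)).add (i, j + 1)).add (i + 1, j)).add (i + 1, j + 1))
      else s) s) PySem.Set.empty

def pvAltStep (m n : Int) (removed : PySem.Set (Int × Int)) (cols : List (List Char)) :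
    List (List Char) :=
  (PySem.List.pyRange 0 n).map (fun j =>
    let col := (PySem.List.pyGet? cols j).getD []
    let off := m - (col.length : Int)
    (PySem.List.enumerate col).filterMap (fun kc =>
      if PySem.Set.contains removed (kc.1 + off, j) then none else some kc.2))

def gShape (M N : Nat) (g : List (List Char)) : Prop :=
  g.length = M ∧ ∀ r ∈ g, r.length = N

def rcell (M : Nat) (col : List Char) (i : Nat) : Char :=
  if i < M - col.length then 'X' else col.getD (i - (M - col.length)) '?'

def render (M : Nat) (cols : List (List Char)) : List (List Char) :=
  (List.range M).map (fun i => cols.map (fun col => rcell M col i))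

def colsInv (M N : Nat) (cols : List (List Char)) : Prop :=
  cols.length = N ∧ ∀ col ∈ cols, col.length ≤ M ∧ 'X' ∉ col

-- B's bottom-up columns: the same invariant, and the top-down view
def colsInvB (M N : Nat) (cols : List (List Char)) : Prop :=
  cols.length = N ∧ ∀ col ∈ cols, col.length ≤ M ∧ 'X' ∉ col

def tdView (cols : List (List Char)) : List (List Char) := cols.map List.reverse

theorem colsInv_tdView {M N : Nat} (cols : List (List Char)) (h : colsInvB M N cols) :
    colsInv M N (tdView cols) := by
  obtain ⟨h1, h2⟩ := h
  refine ⟨by simp [tdView, h1], ?_⟩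
  intro col hc
  simp only [tdView, List.mem_map] at hc
  obtain ⟨c, hc, rfl⟩ := hc
  simpa using h2 c hc

theorem foldl_snd {α : Type} (L : List Int) (fA : (Bool × α) → Int → (Bool × α))
    (fB : α → Int → α) (h : ∀ st i, i ∈ L → (fA st i).2 = fB st.2 i) :
    ∀ st : Bool × α, (L.foldl fA st).2 = L.foldl fB st.2 := by
  induction L with
  | nil => intro st; rfl
  | cons x xs ih =>
    intro st
    simp only [List.foldl_cons]
    rw [← h st x (by simp)]
    exact ih (fun st i hi => h st i (by simp [hi])) (fA st x)

theorem set_add_ne_nil {α : Type} [BEq α] (s : PySem.Set α) (x : α) : s.add x ≠ [] := by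
  unfold PySem.Set.add
  split
  · rename_i hc
    intro hnil
    subst hnil
    simp [PySem.Set.contains] at hc
  · simp

theorem filter_erase_X (l : List Char) :
    (l.erase 'X').filter (fun c => c ≠ 'X') = l.filter (fun c => c ≠ 'X') := by
  induction l with
  | nil => rfl
  | cons a l ih =>
    by_cases ha : a = 'X'
    · subst ha; simp
    · have he : (a :: l).erase 'X' = a :: l.erase 'X' := List.erase_cons_tail (by simp [ha])
      rw [he, List.filter_cons, List.filter_cons, ih]

theorem stripX_eq (l : List Char) : ∀ ct, pvStripX l ct = (l.filter (fun c => c ≠ 'X'), ct + l.count 'X') := by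
  induction hl : l.length using Nat.strong_induction_on generalizing l with
  | _ len ih =>
    intro ct
    unfold pvStripX
    split
    · rename_i h
      have hne : l ≠ [] := by rintro rfl; simp at h
      have hlen : (l.erase 'X').length = l.length - 1 := List.length_erase_of_mem h
      have hpos : 0 < l.length := List.length_pos_iff.mpr hne
      rw [ih (l.erase 'X').length (by omega) _ rfl]
      have hcnt : (l.erase 'X').count 'X' = l.count 'X' - 1 := List.count_erase_self
      have hcpos : 0 < l.count 'X' := List.count_pos_iff.mpr h
      rw [filter_erase_X, hcnt]
      rw [Prod.mk.injEq]
      exact ⟨rfl, by omega⟩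
    · rename_i h
      have : l.count 'X' = 0 := by
        simp [List.count_eq_zero]
        intro hx; exact h hx
      rw [this]
      have hf : l.filter (fun c => c ≠ 'X') = l := by
        apply List.filter_eq_self.mpr
        intro a ha; simp; rintro rfl; exact h ha
      rw [hf]
      simp

theorem insert_loop (ct : Nat) (rest : List Char) :
    (List.range ct).foldl (fun acc _ => 'X' :: acc) rest = List.replicate ct 'X' ++ rest := by
  induction ct generalizing rest with
  | zero => rfl
  | succ k ih =>
    rw [List.range_succ, List.foldl_append, ih]
    simp [List.replicate_succ]

theorem dropCol_eq (col : List Char) :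
    pvDropCol col = List.replicate (col.count 'X') 'X' ++ col.filter (fun c => c ≠ 'X') := by
  unfold pvDropCol
  rw [stripX_eq, insert_loop]
  simp

theorem dropCol_length (col : List Char) : (pvDropCol col).length = col.length := by
  rw [dropCol_eq]
  simp only [List.length_append, List.length_replicate]
  have h0 : (col.filter (fun c => decide (c ≠ 'X'))).length
      = List.countP (fun c : Char => decide (c ≠ 'X')) col := (List.countP_eq_length_filter ..).symm
  have h1 := List.length_eq_countP_add_countP (fun c : Char => decide (c = 'X')) (l := col)
  have h2 : List.count 'X' col = List.countP (fun c : Char => decide (c = 'X')) col := by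
    rw [List.count_eq_countP]
    exact List.countP_congr (by intro a _; simp)
  have h3 : List.countP (fun c : Char => decide (c ≠ 'X')) col
      = List.countP (fun a : Char => decide ¬(decide (a = 'X') = true)) col :=
    List.countP_congr (by intro a _; simp)
  omega

theorem foldl_min_const (N : Nat) (rs : List (List Char)) (h : ∀ t ∈ rs, t.length = N) :
    rs.foldl (fun acc t => min acc t.length) N = N := by
  induction rs with
  | nil => rfl
  | cons t rs ih =>
    simp only [List.foldl_cons, h t (by simp), min_self]
    exact ih (fun t ht => h t (by simp [ht]))

theorem zipT_rect (M N : Nat) (g : List (List Char)) (hg : gShape M N g) (hM : 1 ≤ M) :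
    pvZipT g = (List.range N).map (fun j => g.map (fun r => r.getD j '?')) := by
  obtain ⟨hlen, hrows⟩ := hg
  cases g with
  | nil => simp at hlen; omega
  | cons r rs =>
    show (List.range (rs.foldl (fun acc t => min acc t.length) r.length)).map _ = _
    rw [hrows r (by simp), foldl_min_const N rs (fun t ht => hrows t (by simp [ht]))]

theorem scan_flag (m n : Int) (b : List (List Char)) :
    (pvScan m n b).1 = !(pvScan m n b).2.isEmpty := by
  unfold pvScan
  refine List.foldlRecOn (motive := fun st : Bool × PySem.Set (Int × Int) => st.1 = !st.2.isEmpty)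
    _ _ (by simp [PySem.Set.empty]) ?_
  intro st hst i _
  refine List.foldlRecOn (motive := fun st : Bool × PySem.Set (Int × Int) => st.1 = !st.2.isEmpty)
    _ _ hst ?_
  intro st' hst' j _
  split
  · have hne := set_add_ne_nil ((((st'.2.add ((i : Int), (j : Int))).add (i, j + 1)).add (i + 1, j))) (i + 1, j + 1)
    simp [hne]
  · exact hst'

theorem altCell_ne_X {M N : Nat} (cols : List (List Char)) (hInv : colsInv M N cols)
    (i j : Int) : pvAltCell (M : Int) cols i j ≠ some 'X' := by
  simp only [pvAltCell]
  cases hc : PySem.List.pyGet? cols j with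
  | none =>
    simp only [Option.getD_none]
    split
    · simp [PySem.List.pyGet?, PySem.List.pyIdx?]
    · intro h; simp at h
  | some col =>
    have hcol := PySem.List.mem_of_pyGet?_eq_some _ hc
    have hX : 'X' ∉ col := (hInv.2 col hcol).2
    simp only [Option.getD_some]
    split
    · cases hg : PySem.List.pyGet? col (i - ((M : Int) - col.length)) with
      | none => simp
      | some c =>
        have hmem := PySem.List.mem_of_pyGet?_eq_some _ hg
        intro hEq
        apply hX
        rw [(Option.some.injEq _ _).mp hEq] at hmem
        exact hmem
    · intro h; simp at h

theorem getElem_nat_pyGet {α : Type} (xs : List α) (j : Nat) (hj : j < xs.length) :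
    PySem.List.pyGet? xs (j : Int) = some xs[j] := by
  rw [PySem.List.pyGet?_natCast]
  simp [List.getElem?_eq_getElem hj]

theorem cellA_render {M N : Nat} (cols : List (List Char)) (hInv : colsInv M N cols)
    (i j : Nat) (hi : i < M) (hj : j < N) :
    pvCellA (render M cols) (i : Int) (j : Int) = (pvAltCell (M : Int) cols (i : Int) (j : Int)).getD 'X' := by
  have hjlen : j < cols.length := by rw [hInv.1]; exact hj
  have hcolmem : cols[j] ∈ cols := List.getElem_mem hjlen
  have hlen : cols[j].length ≤ M := (hInv.2 _ hcolmem).1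
  have hrl : (render M cols).length = M := by simp [render]
  have h1 : PySem.List.pyGet? (render M cols) (i : Int) = some (cols.map (fun col => rcell M col i)) := by
    rw [PySem.List.pyGet?_natCast]
    simp [render, hi]
  have h2 : PySem.List.pyGet? (cols.map (fun col => rcell M col i)) (j : Int)
      = some (rcell M cols[j] i) := by
    rw [PySem.List.pyGet?_natCast]
    simp [List.getElem?_eq_getElem hjlen]
  rw [pvCellA, h1, Option.getD_some, h2, Option.getD_some]
  simp only [pvAltCell, getElem_nat_pyGet cols j hjlen, Option.getD_some]
  by_cases hcase : i < M - cols[j].length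
  · have : ¬ ((M : Int) - cols[j].length ≤ (i : Int)) := by omega
    rw [if_neg this]
    simp [rcell, hcase]
  · have hle : ((M : Int) - cols[j].length ≤ (i : Int)) := by omega
    rw [if_pos hle]
    have hidx : ((i : Int) - ((M : Int) - cols[j].length)) = ((i - (M - cols[j].length) : Nat) : Int) := by
      omega
    rw [hidx, PySem.List.pyGet?_natCast]
    have hbound : i - (M - cols[j].length) < cols[j].length := by omega
    simp [rcell, hcase, List.getElem?_eq_getElem hbound]

theorem optX_iff (o1 o2 o3 o4 : Option Char) (h1 : o1 ≠ some 'X') (h2 : o2 ≠ some 'X')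
    (h3 : o3 ≠ some 'X') (h4 : o4 ≠ some 'X') :
    (o1.getD 'X' ≠ 'X' ∧ o1.getD 'X' = o2.getD 'X' ∧ o1.getD 'X' = o3.getD 'X' ∧
      o1.getD 'X' = o4.getD 'X')
    ↔ (o1.isSome ∧ o1 = o2 ∧ o1 = o3 ∧ o1 = o4) := by
  cases o1 <;> cases o2 <;> cases o3 <;> cases o4 <;> simp_all

theorem cond_iff {M N : Nat} (cols : List (List Char)) (hInv : colsInv M N cols)
    (i j : Int) (hi0 : 0 ≤ i) (hi : i < (M : Int) - 1) (hj0 : 0 ≤ j) (hj : j < (N : Int) - 1) :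
    (pvCellA (render M cols) i j ≠ 'X' ∧
      pvCellA (render M cols) i j = pvCellA (render M cols) i (j + 1) ∧
      pvCellA (render M cols) i j = pvCellA (render M cols) (i + 1) j ∧
      pvCellA (render M cols) i j = pvCellA (render M cols) (i + 1) (j + 1))
    ↔ ((pvAltCell (M : Int) cols i j).isSome ∧
      pvAltCell (M : Int) cols i j = pvAltCell (M : Int) cols i (j + 1) ∧
      pvAltCell (M : Int) cols i j = pvAltCell (M : Int) cols (i + 1) j ∧
      pvAltCell (M : Int) cols i j = pvAltCell (M : Int) cols (i + 1) (j + 1)) := by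
  obtain ⟨i', rfl⟩ : ∃ i' : Nat, i = (i' : Int) := ⟨i.toNat, by omega⟩
  obtain ⟨j', rfl⟩ : ∃ j' : Nat, j = (j' : Int) := ⟨j.toNat, by omega⟩
  have ei : ((i' : Int) + 1) = ((i' + 1 : Nat) : Int) := by omega
  have ej : ((j' : Int) + 1) = ((j' + 1 : Nat) : Int) := by omega
  rw [ei, ej]
  rw [cellA_render cols hInv i' j' (by omega) (by omega),
      cellA_render cols hInv i' (j' + 1) (by omega) (by omega),
      cellA_render cols hInv (i' + 1) j' (by omega) (by omega),
      cellA_render cols hInv (i' + 1) (j' + 1) (by omega) (by omega)]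
  exact optX_iff _ _ _ _ (altCell_ne_X cols hInv _ _) (altCell_ne_X cols hInv _ _)
    (altCell_ne_X cols hInv _ _) (altCell_ne_X cols hInv _ _)

theorem scan_set_eq {M N : Nat} (cols : List (List Char)) (hInv : colsInv M N cols) :
    (pvScan (M : Int) (N : Int) (render M cols)).2 = pvAltScan (M : Int) (N : Int) cols := by
  unfold pvScan pvAltScan
  refine foldl_snd _ _ _ ?_ _
  intro st i hi
  rw [PySem.List.mem_pyRange_one] at hi
  refine foldl_snd _ _ _ ?_ _
  intro st' j hj
  rw [PySem.List.mem_pyRange_one] at hj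
  simp only []
  rw [if_congr (cond_iff cols hInv i j hi.1 hi.2 hj.1 hj.2) rfl rfl]
  split <;> rfl

theorem altScan_bounds (m n : Int) (cols : List (List Char)) :
    ∀ p ∈ pvAltScan m n cols, 0 ≤ p.1 ∧ p.1 < m ∧ 0 ≤ p.2 ∧ p.2 < n := by
  unfold pvAltScan
  refine List.foldlRecOn
    (motive := fun s : PySem.Set (Int × Int) => ∀ p ∈ s, 0 ≤ p.1 ∧ p.1 < m ∧ 0 ≤ p.2 ∧ p.2 < n)
    _ _ (by simp [PySem.Set.empty]) ?_
  intro s hs i hi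
  rw [PySem.List.mem_pyRange_one] at hi
  refine List.foldlRecOn
    (motive := fun s : PySem.Set (Int × Int) => ∀ p ∈ s, 0 ≤ p.1 ∧ p.1 < m ∧ 0 ≤ p.2 ∧ p.2 < n)
    _ _ hs ?_
  intro s' hs' j hj
  rw [PySem.List.mem_pyRange_one] at hj
  dsimp only
  split
  · intro p hp
    simp only [PySem.Set.mem_add] at hp
    rcases hp with ((((hp | rfl) | rfl) | rfl) | rfl)
    · exact hs' p hp
    all_goals constructor <;> [omega; constructor <;> [omega; constructor <;> omega]]
  · exact hs'

def markFold (S : List (Int × Int)) (b : List (List Char)) : List (List Char) :=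
  S.foldl (fun b p => pvMark b p.1 p.2) b

theorem mark_shape {M N : Nat} (b : List (List Char)) (hsh : gShape M N b) (i j : Int) :
    gShape M N (pvMark b i j) := by
  obtain ⟨hlen, hrows⟩ := hsh
  by_cases hk : i.toNat < b.length
  · constructor
    · simp [pvMark, hlen]
    · intro r hr
      rcases List.mem_or_eq_of_mem_set hr with hr | rfl
      · exact hrows r hr
      · rw [List.getD_eq_getElem _ _ hk]
        simp only [List.length_set]
        exact hrows _ (List.getElem_mem hk)
  · have heq : pvMark b i j = b := List.set_eq_of_length_le (by omega)
    rw [heq]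
    exact ⟨hlen, hrows⟩

theorem markFold_shape {M N : Nat} (S : List (Int × Int)) (b : List (List Char))
    (hsh : gShape M N b) : gShape M N (markFold S b) := by
  induction S generalizing b with
  | nil => exact hsh
  | cons p S ih => exact ih _ (mark_shape b hsh p.1 p.2)

theorem mark_getElem {M N : Nat} (b : List (List Char)) (hsh : gShape M N b)
    (p : Int × Int) (hp : 0 ≤ p.1 ∧ 0 ≤ p.2) (i j : Nat) (hi : i < M) (hj : j < N) :
    ((pvMark b p.1 p.2).getD i []).getD j '?' =
      if p = ((i : Int), (j : Int)) then 'X' else (b.getD i []).getD j '?' := by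
  obtain ⟨hlen, hrows⟩ := hsh
  have hib : i < b.length := by omega
  have hjb : j < (b[i]).length := by rw [hrows _ (List.getElem_mem hib)]; exact hj
  have hib' : i < (pvMark b p.1 p.2).length := by simp [pvMark]; omega
  rw [List.getD_eq_getElem _ _ hib']
  simp only [pvMark] at hib' ⊢
  rw [List.getElem_set]
  by_cases h1 : p.1.toNat = i
  · have hp1 : p.1 = (i : Int) := by omega
    rw [if_pos h1]
    have : b.getD p.1.toNat [] = b[i] := by rw [h1, List.getD_eq_getElem _ _ hib]
    rw [this]
    have hjset : j < (b[i].set p.2.toNat 'X').length := by simp [hjb]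
    rw [List.getD_eq_getElem _ _ hjset, List.getElem_set]
    by_cases h2 : p.2.toNat = j
    · have hp2 : p.2 = (j : Int) := by omega
      rw [if_pos h2, if_pos (by rw [← hp1, ← hp2])]
    · have hp2 : p.2 ≠ (j : Int) := by omega
      rw [if_neg h2, if_neg (by intro h; exact hp2 (by rw [h]))]
      rw [List.getD_eq_getElem _ _ hib, List.getD_eq_getElem _ _ hjb]
  · have hp1 : p.1 ≠ (i : Int) := by omega
    rw [if_neg h1, if_neg (by intro h; exact hp1 (by rw [h]))]
    rw [List.getD_eq_getElem _ _ hib]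

theorem markFold_getElem {M N : Nat} (S : List (Int × Int))
    (hS : ∀ p ∈ S, 0 ≤ p.1 ∧ 0 ≤ p.2) (b : List (List Char)) (hsh : gShape M N b)
    (i j : Nat) (hi : i < M) (hj : j < N) :
    ((markFold S b).getD i []).getD j '?' =
      if ((i : Int), (j : Int)) ∈ S then 'X' else (b.getD i []).getD j '?' := by
  induction S generalizing b with
  | nil => simp [markFold]
  | cons p S ih =>
    show ((markFold S (pvMark b p.1 p.2)).getD i []).getD j '?' = _
    rw [ih (fun q hq => hS q (by simp [hq])) _ (mark_shape b hsh p.1 p.2),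
        mark_getElem b hsh p (hS p (by simp)) i j hi hj]
    by_cases h1 : ((i : Int), (j : Int)) ∈ S
    · simp [h1]
    · by_cases h2 : p = ((i : Int), (j : Int)) <;> simp [h1, h2, List.mem_cons, eq_comm]

theorem mask_filter (P : Int → Bool) (col : List Char) (hX : 'X' ∉ col) : ∀ s : Int,
    ((PySem.List.enumerate col s).map (fun kc => if P kc.1 then 'X' else kc.2)).filter
        (fun c => c ≠ 'X')
    = (PySem.List.enumerate col s).filterMap
        (fun kc => if P kc.1 then none else some kc.2) := by
  induction col with
  | nil => intro s; rfl
  | cons a l ih =>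
    intro s
    have ha : a ≠ 'X' := by intro h; exact hX (by simp [h])
    have hX' : 'X' ∉ l := fun h => hX (List.mem_cons_of_mem _ h)
    rw [PySem.List.enumerate_cons]
    simp only [List.map_cons, List.filter_cons, List.filterMap_cons]
    by_cases hp : P s
    · simp only [hp, if_true]
      rw [if_neg (by simp)]
      exact ih hX' (s + 1)
    · simp only [hp]
      rw [if_pos (by simp [ha])]
      rw [ih hX' (s + 1)]
      simp

theorem altStep_length (m n : Int) (S : PySem.Set (Int × Int)) (cols : List (List Char)) :
    (pvAltStep m n S cols).length = n.toNat := by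
  simp [pvAltStep, PySem.List.pyRange_zero]

theorem altStep_get {N : Nat} (m : Int) (S : PySem.Set (Int × Int)) (cols : List (List Char))
    (hlen : cols.length = N) (j : Nat) (hj : j < N) :
    (pvAltStep m (N : Int) S cols)[j]'(by rw [altStep_length]; omega) =
      (PySem.List.enumerate (cols[j]'(by omega))).filterMap
        (fun kc => if PySem.Set.contains S (kc.1 + (m - ((cols[j]'(by omega)).length : Int)), (j : Int))
                   then none else some kc.2) := by
  simp only [pvAltStep, PySem.List.pyRange_zero_nat]
  rw [List.getElem_map, List.getElem_map, List.getElem_range]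
  rw [getElem_nat_pyGet cols j (by omega)]
  rfl

theorem render_shape {M N : Nat} (cols : List (List Char)) (hlen : cols.length = N) :
    gShape M N (render M cols) := by
  constructor
  · simp [render]
  · intro r hr
    simp only [render, List.mem_map] at hr
    obtain ⟨i, _, rfl⟩ := hr
    simp [hlen]

theorem render_getD {M N : Nat} (cols : List (List Char)) (hlen : cols.length = N)
    (i j : Nat) (hi : i < M) (hj : j < N) :
    ((render M cols).getD i []).getD j '?' = rcell M (cols[j]'(by omega)) i := by
  have h1 : i < (render M cols).length := by simp [render]; omega
  rw [List.getD_eq_getElem _ _ h1]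
  simp only [render]
  rw [List.getElem_map, List.getElem_range]
  have h2 : j < (List.map (fun col => rcell M col i) cols).length := by simp; omega
  rw [List.getD_eq_getElem _ _ h2, List.getElem_map]

theorem countX_add_filter (l : List Char) :
    l.count 'X' + (l.filter (fun c => decide (c ≠ 'X'))).length = l.length := by
  have h1 := dropCol_length l
  rw [dropCol_eq] at h1
  simpa using h1

theorem colOf_marked {M N : Nat} (cols : List (List Char)) (hInv : colsInv M N cols)
    (S : List (Int × Int)) (hS : ∀ p ∈ S, 0 ≤ p.1 ∧ p.1 < (M : Int) ∧ 0 ≤ p.2 ∧ p.2 < (N : Int))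
    (j : Nat) (hj : j < N) :
    (markFold S (render M cols)).map (fun r => r.getD j '?') =
      List.replicate (M - (cols[j]'(by rw [hInv.1]; exact hj)).length) 'X' ++
      (PySem.List.enumerate (cols[j]'(by rw [hInv.1]; exact hj))).map
        (fun kc => if PySem.Set.contains S
            (kc.1 + ((M : Int) - ((cols[j]'(by rw [hInv.1]; exact hj)).length : Int)), (j : Int))
          then 'X' else kc.2) := by
  have hjc : j < cols.length := by rw [hInv.1]; exact hj
  set col := cols[j]'hjc with hcol
  have hhM : col.length ≤ M := (hInv.2 _ (List.getElem_mem hjc)).1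
  have hgsh : gShape M N (markFold S (render M cols)) :=
    markFold_shape S _ (render_shape cols hInv.1)
  apply List.ext_getElem
  · simp [hgsh.1, PySem.List.length_enumerate]
    omega
  · intro i hi1 hi2
    have hiM : i < M := by simpa [hgsh.1] using hi1
    rw [List.getElem_map]
    have higl : i < (markFold S (render M cols)).length := by rw [hgsh.1]; exact hiM
    have hrow : (markFold S (render M cols))[i]'higl = (markFold S (render M cols)).getD i [] := by
      rw [List.getD_eq_getElem _ _ higl]
    rw [hrow, markFold_getElem S (fun p hp => ⟨(hS p hp).1, (hS p hp).2.2.1⟩) _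
          (render_shape cols hInv.1) i j hiM hj,
        render_getD cols hInv.1 i j hiM hj]
    by_cases hcase : i < M - col.length
    · rw [List.getElem_append_left (by simp; omega)]
      rw [List.getElem_replicate]
      split
      · rfl
      · simp [rcell, ← hcol, hcase]
    · have hlrep : (List.replicate (M - col.length) 'X').length ≤ i := by simp; omega
      rw [List.getElem_append_right hlrep]
      simp only [List.length_replicate]
      have hkb : i - (M - col.length) < col.length := by omega
      rw [List.getElem_map, PySem.List.getElem_enumerate]
      have harg : ((0 : Int) + ((i - (M - col.length) : Nat) : Int) + ((M : Int) - (col.length : Int)), (j : Int))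
          = ((i : Int), (j : Int)) := by
        rw [Prod.mk.injEq]
        exact ⟨by omega, rfl⟩
      rw [harg]
      by_cases hmem : ((i : Int), (j : Int)) ∈ S
      · rw [if_pos hmem, if_pos (PySem.Set.contains_iff S _ |>.mpr hmem)]
      · rw [if_neg hmem, if_neg (by rw [PySem.Set.contains_iff]; exact hmem)]
        simp [rcell, ← hcol, hcase, List.getElem?_eq_getElem hkb]

theorem altStep_inv {M N : Nat} (cols : List (List Char)) (hInv : colsInv M N cols)
    (S : PySem.Set (Int × Int)) : colsInv M N (pvAltStep (M : Int) (N : Int) S cols) := by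
  constructor
  · rw [altStep_length]; simp
  · intro col' hc
    simp only [pvAltStep, List.mem_map] at hc
    obtain ⟨j, _, hcol'⟩ := hc
    set colx := (PySem.List.pyGet? cols j).getD [] with hcolx
    have hsub : ∀ c ∈ col', c ∈ colx := by
      intro c hcmem
      rw [← hcol'] at hcmem
      simp only [List.mem_filterMap] at hcmem
      obtain ⟨kc, hkc, hsel⟩ := hcmem
      have : c = kc.2 := by
        by_cases hP : PySem.Set.contains S (kc.1 + ((M : Int) - (colx.length : Int)), j)
        · rw [if_pos hP] at hsel; exact absurd hsel (by simp)
        · rw [if_neg hP] at hsel; exact ((Option.some.injEq _ _).mp hsel).symm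
      subst this
      rw [PySem.List.mem_enumerate_iff] at hkc
      obtain ⟨k, hk, rfl⟩ := hkc
      exact List.getElem_mem hk
    have hXcolx : 'X' ∉ colx ∧ colx.length ≤ M := by
      cases hpg : PySem.List.pyGet? cols j with
      | none => simp [hcolx, hpg]
      | some cc =>
        have := PySem.List.mem_of_pyGet?_eq_some _ hpg
        rw [hcolx, hpg]
        exact ⟨(hInv.2 cc this).2, (hInv.2 cc this).1⟩
    constructor
    · calc col'.length ≤ (PySem.List.enumerate colx).length := by
            rw [← hcol']; exact List.length_filterMap_le _ _
        _ = colx.length := PySem.List.length_enumerate _ _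
        _ ≤ M := hXcolx.2
    · intro hX
      exact hXcolx.1 (hsub _ hX)

theorem dropCol_marked {M N : Nat} (cols : List (List Char)) (hInv : colsInv M N cols)
    (S : List (Int × Int)) (hS : ∀ p ∈ S, 0 ≤ p.1 ∧ p.1 < (M : Int) ∧ 0 ≤ p.2 ∧ p.2 < (N : Int))
    (j : Nat) (hj : j < N) :
    pvDropCol ((markFold S (render M cols)).map (fun r => r.getD j '?')) =
      List.replicate (M - ((pvAltStep (M : Int) (N : Int) S cols)[j]'(by rw [altStep_length]; simpa)).length) 'X' ++
      (pvAltStep (M : Int) (N : Int) S cols)[j]'(by rw [altStep_length]; simpa) := by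
  have hjc : j < cols.length := by rw [hInv.1]; exact hj
  have hhM : (cols[j]'hjc).length ≤ M := (hInv.2 _ (List.getElem_mem hjc)).1
  have hX : 'X' ∉ cols[j]'hjc := (hInv.2 _ (List.getElem_mem hjc)).2
  rw [colOf_marked cols hInv S hS j hj, dropCol_eq]
  set col := cols[j]'hjc with hcol
  set P : Int → Bool := fun t => PySem.Set.contains S (t + ((M : Int) - (col.length : Int)), (j : Int)) with hP
  have hmasked : (List.map (fun kc => if PySem.Set.contains S
        (kc.1 + ((M : Int) - (col.length : Int)), (j : Int)) then 'X' else kc.2)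
        (PySem.List.enumerate col)) =
      (PySem.List.enumerate col).map (fun kc => if P kc.1 then 'X' else kc.2) := rfl
  have hfil : (List.replicate (M - col.length) 'X' ++
      (PySem.List.enumerate col).map (fun kc => if P kc.1 then 'X' else kc.2)).filter
        (fun c => decide (c ≠ 'X')) =
      (PySem.List.enumerate col).filterMap (fun kc => if P kc.1 then none else some kc.2) := by
    rw [List.filter_append, mask_filter P col hX 0]
    simp
  have hget : (pvAltStep (M : Int) (N : Int) S cols)[j]'(by rw [altStep_length]; simpa) =
      (PySem.List.enumerate col).filterMap (fun kc => if P kc.1 then none else some kc.2) := by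
    rw [altStep_get (M : Int) S cols hInv.1 j hj]
  rw [hmasked, hfil, ← hget]
  congr 1
  have hcnt := countX_add_filter (List.replicate (M - col.length) 'X' ++
      (PySem.List.enumerate col).map (fun kc => if P kc.1 then 'X' else kc.2))
  rw [hfil, ← hget] at hcnt
  have hlencol : (List.replicate (M - col.length) 'X' ++
      (PySem.List.enumerate col).map (fun kc => if P kc.1 then 'X' else kc.2)).length = M := by
    simp [PySem.List.length_enumerate]
    omega
  rw [hlencol] at hcnt
  have hle : ((pvAltStep (M : Int) (N : Int) S cols)[j]'(by rw [altStep_length]; simpa)).length ≤ M := by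
    omega
  congr 1
  omega

theorem repl_getD (M L' i : Nat) (nc : List Char) (hnc : nc.length = L') (hL : L' ≤ M)
    (hi : i < M) : (List.replicate (M - L') 'X' ++ nc).getD i '?' = rcell M nc i := by
  have hlen : (List.replicate (M - L') 'X' ++ nc).length = M := by simp [hnc]; omega
  rw [List.getD_eq_getElem _ _ (by omega)]
  by_cases hcase : i < M - L'
  · rw [List.getElem_append_left (by simp; omega), List.getElem_replicate]
    simp [rcell, hnc, hcase]
  · rw [List.getElem_append_right (by simp; omega)]
    simp only [List.length_replicate]
    have hb : i - (M - L') < nc.length := by omega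
    simp [rcell, hnc, hcase, List.getElem?_eq_getElem hb]

theorem render_row {M : Nat} (cols : List (List Char)) (i : Nat) (_hi : i < M)
    {hproof : i < (render M cols).length} :
    (render M cols)[i]'hproof = cols.map (fun col => rcell M col i) := by
  simp only [render]
  rw [List.getElem_map, List.getElem_range]

theorem step_eq {M N : Nat} (cols : List (List Char)) (hInv : colsInv M N cols)
    (hM : 1 ≤ M) (hN : 1 ≤ N) (S : List (Int × Int))
    (hS : ∀ p ∈ S, 0 ≤ p.1 ∧ p.1 < (M : Int) ∧ 0 ≤ p.2 ∧ p.2 < (N : Int)) :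
    blockMarking S (render M cols) = render M (pvAltStep (M : Int) (N : Int) S cols) := by
  have hg : gShape M N (markFold S (render M cols)) :=
    markFold_shape S _ (render_shape cols hInv.1)
  show pvZipT ((pvZipT (markFold S (render M cols))).map pvDropCol) = _
  rw [zipT_rect M N _ hg hM, List.map_map]
  have hsh2 : gShape N M ((List.range N).map
      (pvDropCol ∘ fun j => (markFold S (render M cols)).map (fun r => r.getD j '?'))) := by
    constructor
    · simp
    · intro r hr
      simp only [List.mem_map, Function.comp] at hr
      obtain ⟨j, _, rfl⟩ := hr
      rw [dropCol_length]
      simp [hg.1]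
  rw [zipT_rect N M _ hsh2 hN]
  have hinv' := altStep_inv cols hInv S
  apply List.ext_getElem
  · simp [render]
  · intro i hi1 hi2
    have hiM : i < M := by simpa using hi1
    rw [List.getElem_map, List.getElem_range, render_row _ i hiM]
    apply List.ext_getElem
    · simp [altStep_length]
    · intro j hj1 hj2
      have hjN : j < N := by simpa using hj1
      simp only [List.getElem_map, List.getElem_range, Function.comp]
      rw [dropCol_marked cols hInv S hS j hjN]
      exact repl_getD M _ i _ rfl ((hinv'.2 _ (List.getElem_mem _)).1) hiM

-- ---- bridging B's bottom-up columns to the top-down view ----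

theorem pyGet?_map {a b : Type} (f : a → b) (xs : List a) (j : Int) :
    PySem.List.pyGet? (xs.map f) j = (PySem.List.pyGet? xs j).map f := by
  simp only [PySem.List.pyGet?, PySem.List.pyIdx?, List.length_map]
  split <;> simp [List.getElem?_map]

theorem altAt_bridge {M : Nat} (cols : List (List Char)) (i j : Int)
    (_hi0 : 0 ≤ i) (hi : i < (M : Int)) :
    altAt (M : Int) cols i j = pvAltCell (M : Int) (tdView cols) i j := by
  simp only [altAt, pvAltCell, tdView, pyGet?_map]
  cases hc : PySem.List.pyGet? cols j with
  | none =>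
    simp only [Option.map_none, Option.getD_none, List.length_nil]
    rw [if_neg (by omega), if_neg (by push_cast; omega)]
  | some col =>
    simp only [Option.map_some, Option.getD_some, List.length_reverse]
    by_cases hcase : (M : Int) - 1 - i < (col.length : Int)
    · rw [if_pos hcase, if_pos (by omega)]
      obtain ⟨k, hkN, hkeq⟩ : ∃ k : Nat, k < col.length ∧ ((M : Int) - 1 - i) = (k : Int) :=
        ⟨((M : Int) - 1 - i).toNat, by omega, by omega⟩
      rw [hkeq, getElem_nat_pyGet col k hkN]
      have h2 : i - ((M : Int) - col.length) = ((col.length - 1 - k : Nat) : Int) := by omega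
      rw [h2, getElem_nat_pyGet col.reverse (col.length - 1 - k) (by simp; omega)]
      congr 1
      rw [List.getElem_reverse]
      congr 1
      omega
    · rw [if_neg hcase, if_neg (by omega)]

-- ---- membership and nodup of A's scan set ----

def fourCells (a b : Int) : List (Int × Int) := [(a, b), (a, b + 1), (a + 1, b), (a + 1, b + 1)]

def wCond (m : Int) (cols : List (List Char)) (a b : Int) : Prop :=
  (pvAltCell m cols a b).isSome ∧ pvAltCell m cols a b = pvAltCell m cols a (b + 1) ∧
  pvAltCell m cols a b = pvAltCell m cols (a + 1) b ∧
  pvAltCell m cols a b = pvAltCell m cols (a + 1) (b + 1)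

theorem mem_foldl_or {α β : Type} [BEq α] [LawfulBEq α] (f : PySem.Set α → β → PySem.Set α)
    (Q : β → α → Prop) (hf : ∀ s x p, p ∈ f s x ↔ p ∈ s ∨ Q x p) :
    ∀ (L : List β) (s : PySem.Set α) (p : α), p ∈ L.foldl f s ↔ p ∈ s ∨ ∃ x ∈ L, Q x p := by
  intro L
  induction L with
  | nil => simp
  | cons x xs ih =>
    intro s p
    simp only [List.foldl_cons]
    rw [ih (f s x) p, hf s x p]
    simp only [List.mem_cons]
    constructor
    · rintro ((h | h) | ⟨y, hy, hQ⟩)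
      · exact Or.inl h
      · exact Or.inr ⟨x, Or.inl rfl, h⟩
      · exact Or.inr ⟨y, Or.inr hy, hQ⟩
    · rintro (h | ⟨y, (rfl | hy), hQ⟩)
      · exact Or.inl (Or.inl h)
      · exact Or.inl (Or.inr hQ)
      · exact Or.inr ⟨y, hy, hQ⟩

theorem mem_altScan (m n : Int) (cols : List (List Char)) (p : Int × Int) :
    p ∈ pvAltScan m n cols ↔
    ∃ a b : Int, (0 ≤ a ∧ a < m - 1) ∧ (0 ≤ b ∧ b < n - 1) ∧ wCond m cols a b ∧
      p ∈ fourCells a b := by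
  unfold pvAltScan
  rw [mem_foldl_or _ (fun i q => ∃ b, (0 ≤ b ∧ b < n - 1) ∧ wCond m cols i b ∧ q ∈ fourCells i b)
      (by
        intro s i q
        dsimp only
        rw [mem_foldl_or _ (fun j r => wCond m cols i j ∧ r ∈ fourCells i j)
            (by
              intro s' j r
              dsimp only
              split
              · rename_i h
                have hw : wCond m cols i j := h
                simp only [PySem.Set.mem_add, fourCells, List.mem_cons, List.mem_singleton,
                  List.not_mem_nil]
                tauto
              · rename_i h
                have hw : ¬ wCond m cols i j := fun hh => h hh
                simp [hw])]
        simp [PySem.List.mem_pyRange_one])]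
  simp only [PySem.Set.empty, List.not_mem_nil, false_or, PySem.List.mem_pyRange_one]
  constructor
  · rintro ⟨a, ha, b, hb, hQ⟩
    exact ⟨a, b, ha, hb, hQ⟩
  · rintro ⟨a, b, ha, hb, hQ⟩
    exact ⟨a, ha, b, hb, hQ⟩

theorem nodup_altScan (m n : Int) (cols : List (List Char)) : (pvAltScan m n cols).Nodup := by
  unfold pvAltScan
  refine List.foldlRecOn (motive := fun s : PySem.Set (Int × Int) => s.Nodup) _ _
    (by simp [PySem.Set.empty]) ?_
  intro s hs i _
  refine List.foldlRecOn (motive := fun s : PySem.Set (Int × Int) => s.Nodup) _ _ hs ?_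
  intro s' hs' j _
  dsimp only
  split
  · exact PySem.Set.nodup_add _ _ (PySem.Set.nodup_add _ _ (PySem.Set.nodup_add _ _
      (PySem.Set.nodup_add _ _ hs')))
  · exact hs'

-- ---- the per-cell doom test agrees with "some monochrome window covers the cell" ----

theorem wCond_cells {m : Int} {cols : List (List Char)} {a b : Int} (h : wCond m cols a b) :
    ∃ v, pvAltCell m cols a b = some v ∧ pvAltCell m cols a (b + 1) = some v ∧
      pvAltCell m cols (a + 1) b = some v ∧ pvAltCell m cols (a + 1) (b + 1) = some v := by
  obtain ⟨hs, h1, h2, h3⟩ := h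
  cases hx : pvAltCell m cols a b with
  | none => rw [hx] at hs; simp at hs
  | some v => exact ⟨v, rfl, by rw [← h1, hx], by rw [← h2, hx], by rw [← h3, hx]⟩

theorem corner_cell {m : Int} {cols : List (List Char)} {a b : Int} {v : Char}
    (hv : pvAltCell m cols a b = some v ∧ pvAltCell m cols a (b + 1) = some v ∧
      pvAltCell m cols (a + 1) b = some v ∧ pvAltCell m cols (a + 1) (b + 1) = some v)
    {p : Int × Int} (hp : p ∈ fourCells a b) : pvAltCell m cols p.1 p.2 = some v := by
  simp only [fourCells, List.mem_cons, List.mem_singleton, List.not_mem_nil, or_false] at hp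
  rcases hp with rfl | rfl | rfl | rfl
  · exact hv.1
  · exact hv.2.1
  · exact hv.2.2.1
  · exact hv.2.2.2

theorem doomed_iff {M N : Nat} (cols : List (List Char)) (i j : Nat)
    (hi : i < M) (hj : j < N) :
    altDoomed (M : Int) (N : Int) cols (i : Int) (j : Int) = true ↔
    ∃ a b : Int, (0 ≤ a ∧ a < (M : Int) - 1) ∧ (0 ≤ b ∧ b < (N : Int) - 1) ∧
      wCond (M : Int) (tdView cols) a b ∧ ((i : Int), (j : Int)) ∈ fourCells a b := by
  unfold altDoomed
  rw [altAt_bridge cols (i : Int) (j : Int) (by omega) (by omega)]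
  cases hc : pvAltCell (M : Int) (tdView cols) (i : Int) (j : Int) with
  | none =>
    simp only [Bool.false_eq_true, false_iff]
    rintro ⟨a, b, ha, hb, hw, hp⟩
    obtain ⟨v, hv⟩ := wCond_cells hw
    have := corner_cell hv hp
    rw [hc] at this
    exact absurd this (by simp)
  | some c =>
    simp only [List.any_eq_true, List.mem_cons, List.mem_singleton, List.not_mem_nil, or_false,
      Bool.and_eq_true, decide_eq_true_eq, beq_iff_eq]
    constructor
    · rintro ⟨a, ha, b, hb, ⟨⟨⟨⟨⟨⟨h0a, h1a⟩, h0b⟩, h1b⟩, e1⟩, e2⟩, e3⟩, e4⟩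
      have hbr : ∀ (x y : Int), 0 ≤ x → x < (M : Int) →
          altAt (M : Int) cols x y = pvAltCell (M : Int) (tdView cols) x y :=
        fun x y hx1 hx2 => altAt_bridge cols x y hx1 hx2
      rw [hbr a b h0a (by omega), hbr a (b + 1) h0a (by omega)] at e1
      rw [hbr a (b + 1) h0a (by omega), hbr (a + 1) b (by omega) (by omega)] at e2
      rw [hbr (a + 1) b (by omega) (by omega), hbr (a + 1) (b + 1) (by omega) (by omega)] at e3
      rw [hbr (a + 1) (b + 1) (by omega) (by omega)] at e4
      refine ⟨a, b, ⟨h0a, h1a⟩, ⟨h0b, h1b⟩, ?_, ?_⟩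
      · refine ⟨?_, ?_, ?_, ?_⟩
        · rw [e1, e2, e3, e4]; simp
        · exact e1
        · rw [e1]; exact e2
        · rw [e1, e2]; exact e3
      · simp only [fourCells, List.mem_cons, List.mem_singleton, List.not_mem_nil, or_false,
          Prod.mk.injEq]
        rcases ha with rfl | rfl <;> rcases hb with rfl | rfl
        · right; right; right; omega
        · right; right; left; omega
        · right; left; omega
        · left; omega
    · rintro ⟨a, b, ⟨h0a, h1a⟩, ⟨h0b, h1b⟩, hw, hp⟩
      obtain ⟨v, hv⟩ := wCond_cells hw
      have hcv : c = v := by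
        have := corner_cell hv hp
        rw [hc] at this
        exact (Option.some.injEq _ _).mp this
      subst hcv
      have hbr : ∀ (x y : Int), 0 ≤ x → x < (M : Int) →
          altAt (M : Int) cols x y = pvAltCell (M : Int) (tdView cols) x y :=
        fun x y hx1 hx2 => altAt_bridge cols x y hx1 hx2
      simp only [fourCells, List.mem_cons, List.mem_singleton, List.not_mem_nil, or_false,
        Prod.mk.injEq] at hp
      have haset : a = (i : Int) - 1 ∨ a = (i : Int) := by rcases hp with ⟨h, _⟩|⟨h, _⟩|⟨h, _⟩|⟨h, _⟩ <;> omega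
      have hbset : b = (j : Int) - 1 ∨ b = (j : Int) := by rcases hp with ⟨_, h⟩|⟨_, h⟩|⟨_, h⟩|⟨_, h⟩ <;> omega
      refine ⟨a, haset, b, hbset, ⟨⟨⟨⟨⟨⟨h0a, h1a⟩, h0b⟩, h1b⟩, ?_⟩, ?_⟩, ?_⟩, ?_⟩
      · rw [hbr a b h0a (by omega), hbr a (b + 1) h0a (by omega), hv.1, hv.2.1]
      · rw [hbr a (b + 1) h0a (by omega), hbr (a + 1) b (by omega) (by omega), hv.2.1, hv.2.2.1]
      · rw [hbr (a + 1) b (by omega) (by omega), hbr (a + 1) (b + 1) (by omega) (by omega),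
          hv.2.2.1, hv.2.2.2]
      · rw [hbr (a + 1) (b + 1) (by omega) (by omega), hv.2.2.2]

theorem mem_scan_iff {M N : Nat} (cols : List (List Char)) (p : Int × Int) :
    p ∈ pvAltScan (M : Int) (N : Int) (tdView cols) ↔
    ∃ i j : Nat, i < M ∧ j < N ∧ altDoomed (M : Int) (N : Int) cols (i : Int) (j : Int) = true ∧
      p = ((i : Int), (j : Int)) := by
  rw [mem_altScan]
  constructor
  · rintro ⟨a, b, ⟨h0a, h1a⟩, ⟨h0b, h1b⟩, hw, hp⟩
    have hcorner : ∃ x y : Int, 0 ≤ x ∧ x < (M : Int) ∧ 0 ≤ y ∧ y < (N : Int) ∧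
        p = (x, y) := by
      simp only [fourCells, List.mem_cons, List.mem_singleton, List.not_mem_nil, or_false] at hp
      rcases hp with rfl | rfl | rfl | rfl
      · exact ⟨a, b, h0a, by omega, h0b, by omega, rfl⟩
      · exact ⟨a, b + 1, h0a, by omega, by omega, by omega, rfl⟩
      · exact ⟨a + 1, b, by omega, by omega, h0b, by omega, rfl⟩
      · exact ⟨a + 1, b + 1, by omega, by omega, by omega, by omega, rfl⟩
    obtain ⟨x, y, hx0, hxM, hy0, hyN, rfl⟩ := hcorner
    refine ⟨x.toNat, y.toNat, by omega, by omega, ?_, by simp; constructor <;> omega⟩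
    rw [doomed_iff cols x.toNat y.toNat (by omega) (by omega)]
    refine ⟨a, b, ⟨h0a, h1a⟩, ⟨h0b, h1b⟩, hw, ?_⟩
    have : ((x.toNat : Int), (y.toNat : Int)) = (x, y) := by
      simp only [Prod.mk.injEq]; constructor <;> omega
    rw [this]
    exact hp
  · rintro ⟨i, j, hi, hj, hd, rfl⟩
    rw [doomed_iff cols i j hi hj] at hd
    exact hd

theorem contains_scan_eq {M N : Nat} (cols : List (List Char)) (i j : Nat)
    (hi : i < M) (hj : j < N) :
    PySem.Set.contains (pvAltScan (M : Int) (N : Int) (tdView cols)) ((i : Int), (j : Int)) =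
      altDoomed (M : Int) (N : Int) cols (i : Int) (j : Int) := by
  rw [← Bool.coe_iff_coe]
  rw [PySem.Set.contains_iff, mem_scan_iff cols]
  constructor
  · rintro ⟨i', j', hi', hj', hd, heq⟩
    rw [Prod.mk.injEq] at heq
    have h1 : i = i' := by omega
    have h2 : j = j' := by omega
    subst h1
    subst h2
    exact hd
  · intro hd
    exact ⟨i, j, hi, hj, hd, rfl⟩

-- ---- the summed mark grid counts exactly the scan set ----

def dRow (M N : Nat) (cols : List (List Char)) (i : Nat) : List (Int × Int) :=
  ((List.range N).filter (fun j : Nat => altDoomed (M : Int) (N : Int) cols (i : Int) (j : Int))).map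
    (fun j : Nat => ((i : Int), (j : Int)))

def dList (M N : Nat) (cols : List (List Char)) : List (Int × Int) :=
  (List.range M).flatMap (dRow M N cols)

theorem mem_dList {M N : Nat} (cols : List (List Char)) (p : Int × Int) :
    p ∈ dList M N cols ↔ ∃ i j : Nat, i < M ∧ j < N ∧
      altDoomed (M : Int) (N : Int) cols (i : Int) (j : Int) = true ∧ p = ((i : Int), (j : Int)) := by
  simp only [dList, dRow, List.mem_flatMap, List.mem_map, List.mem_filter, List.mem_range]
  constructor
  · rintro ⟨i, hi, j, ⟨hj, hd⟩, rfl⟩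
    exact ⟨i, j, hi, hj, hd, rfl⟩
  · rintro ⟨i, j, hi, hj, hd, rfl⟩
    exact ⟨i, hi, j, ⟨hj, hd⟩, rfl⟩

theorem nodup_dRow {M N : Nat} (cols : List (List Char)) (i : Nat) : (dRow M N cols i).Nodup := by
  apply List.Nodup.map
  · intro x y hxy
    have := congrArg Prod.snd hxy
    simpa using this
  · exact (List.nodup_range).filter _

theorem nodup_flatMap_fst (f : Nat → List (Int × Int))
    (hrow : ∀ i, (f i).Nodup) (hfst : ∀ i p, p ∈ f i → p.1 = (i : Int)) :
    ∀ K : Nat, ((List.range K).flatMap f).Nodup := by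
  intro K
  induction K with
  | zero => simp
  | succ K ih =>
    rw [List.range_succ, List.flatMap_append]
    refine List.Nodup.append ih (by simpa using hrow K) ?_
    intro p hp hq
    simp only [List.flatMap_cons, List.flatMap_nil, List.append_nil] at hq
    have h1 := hfst K p hq
    simp only [List.mem_flatMap, List.mem_range] at hp
    obtain ⟨i, hi, hpi⟩ := hp
    have h2 := hfst i p hpi
    rw [h1] at h2
    omega

theorem nodup_dList {M N : Nat} (cols : List (List Char)) : (dList M N cols).Nodup := by
  unfold dList
  apply nodup_flatMap_fst
  · exact nodup_dRow cols
  · intro i p hp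
    simp only [dRow, List.mem_map, List.mem_filter, List.mem_range] at hp
    obtain ⟨j, _, rfl⟩ := hp
    rfl

theorem length_dList {M N : Nat} (cols : List (List Char)) :
    (dList M N cols).length =
      ((List.range M).map (fun i : Nat =>
        (List.range N).countP (fun j : Nat =>
          altDoomed (M : Int) (N : Int) cols (i : Int) (j : Int)))).sum := by
  rw [dList, List.length_flatMap]
  congr 1
  apply List.map_congr_left
  intro i _
  rw [dRow, List.length_map, List.countP_eq_length_filter]

theorem removed_eq_len {M N : Nat} (cols : List (List Char)) :
    altRemoved (altMarked (M : Int) (N : Int) cols) =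
      PySem.Set.len (pvAltScan (M : Int) (N : Int) (tdView cols)) := by
  have hset : PySem.Set.len (pvAltScan (M : Int) (N : Int) (tdView cols)) =
      ((pvAltScan (M : Int) (N : Int) (tdView cols)).length : Int) := by
    simp [PySem.Set.len]
  have hperm : (pvAltScan (M : Int) (N : Int) (tdView cols)).Perm (dList M N cols) := by
    rw [List.perm_ext_iff_of_nodup (nodup_altScan _ _ _) (nodup_dList cols)]
    intro p
    rw [mem_scan_iff cols, mem_dList cols]
  rw [hset, hperm.length_eq, length_dList]
  unfold altRemoved altMarked
  rw [Nat.cast_list_sum, List.map_map, List.map_map]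
  rw [PySem.List.pyRange_zero_nat M, List.map_map]
  apply congrArg List.sum
  apply List.map_congr_left
  intro i _
  simp only [Function.comp_apply, Function.comp_def]
  rw [List.map_map]
  simp only [Function.comp_def]
  rw [PySem.List.sum_map_ite_one_zero
      (fun j : Int => altDoomed (M : Int) (N : Int) cols (i : Int) j)]
  rw [PySem.List.pyRange_zero_nat N, List.countP_map]
  rfl

-- ---- gravity: filtering a bottom-up column is the reverse of the top-down survivors ----

theorem filterMap_enumerate_reverse (col : List Char) (p q : Int → Bool) :
    ∀ (s t : Int), (∀ k : Nat, k < col.length → p (s + k) = q (t + (col.length : Int) - 1 - k)) →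
    (PySem.List.enumerate col.reverse s).filterMap (fun kc => if p kc.1 then none else some kc.2) =
      ((PySem.List.enumerate col t).filterMap (fun kc => if q kc.1 then none else some kc.2)).reverse := by
  induction col with
  | nil => intro s t _; rfl
  | cons c rest ih =>
    intro s t h
    have hrev : (c :: rest).reverse = rest.reverse ++ [c] := by simp
    have hih := ih s (t + 1) (by
      intro k hk
      have hh := h k (by simp; omega)
      rw [hh]
      congr 1
      simp only [List.length_cons]
      push_cast
      ring)
    have hlast : p (s + (rest.length : Int)) = q t := by
      have hh := h rest.length (by simp)
      rw [hh]
      congr 1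
      simp only [List.length_cons]
      push_cast
      ring
    rw [hrev, PySem.List.enumerate_append, List.filterMap_append]
    rw [PySem.List.enumerate_cons, PySem.List.enumerate_nil]
    rw [PySem.List.enumerate_cons]
    simp only [List.filterMap_cons, List.filterMap_nil, List.append_nil]
    rw [hih]
    by_cases hq : q t = true
    · have hp' : p (s + (rest.length : Int)) = true := by rw [hlast]; exact hq
      simp [hq, hp']
    · have hq' : q t = false := by simpa using hq
      have hp' : p (s + (rest.length : Int)) = false := by rw [hlast]; exact hq'
      simp [hq', hp']

-- ---- the marked-grid lookup, in range, is the doom test ----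

theorem markAt_eq {M N : Nat} (cols : List (List Char)) (i j : Nat) (hi : i < M) (hj : j < N) :
    altMarkAt (altMarked (M : Int) (N : Int) cols) (i : Int) (j : Int) =
      altDoomed (M : Int) (N : Int) cols (i : Int) (j : Int) := by
  unfold altMarkAt altMarked
  have h1 : (PySem.List.pyGet? ((PySem.List.pyRange 0 (M : Int)).map (fun i =>
      (PySem.List.pyRange 0 (N : Int)).map (fun j => altDoomed (M : Int) (N : Int) cols i j)))
      (i : Int)).getD [] = PySem.List.pyGetD ((PySem.List.pyRange 0 (M : Int)).map (fun i =>
      (PySem.List.pyRange 0 (N : Int)).map (fun j => altDoomed (M : Int) (N : Int) cols i j)))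
      (i : Int) [] := rfl
  rw [h1, PySem.List.pyGetD_map_pyRange_of_nonneg _ _ _ _ (by omega) (by omega)]
  have h2 : (PySem.List.pyGet? ((PySem.List.pyRange 0 (N : Int)).map
      (fun j => altDoomed (M : Int) (N : Int) cols (i : Int) j)) (j : Int)).getD false =
      PySem.List.pyGetD ((PySem.List.pyRange 0 (N : Int)).map
      (fun j => altDoomed (M : Int) (N : Int) cols (i : Int) j)) (j : Int) false := rfl
  rw [h2, PySem.List.pyGetD_map_pyRange_of_nonneg _ _ _ _ (by omega) (by omega)]

-- ---- B's new columns are the top-down survivor step, reversed ----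

theorem newCols_length (m n : Int) (marked : List (List Bool)) (cols : List (List Char)) :
    (altNewCols m n marked cols).length = n.toNat := by
  simp [altNewCols, PySem.List.pyRange_zero]

theorem newCols_get {N : Nat} (m : Int) (marked : List (List Bool)) (cols : List (List Char))
    (j : Nat) (hj : j < N) :
    (altNewCols m (N : Int) marked cols)[j]'(by rw [newCols_length]; omega) =
      (PySem.List.enumerate ((PySem.List.pyGet? cols (j : Int)).getD [])).filterMap (fun kc =>
        if altMarkAt marked (m - 1 - kc.1) (j : Int) then none else some kc.2) := by
  simp only [altNewCols, PySem.List.pyRange_zero_nat]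
  rw [List.getElem_map, List.getElem_map, List.getElem_range]

theorem newCols_bridge {M N : Nat} (cols : List (List Char)) (hInv : colsInvB M N cols) :
    pvAltStep (M : Int) (N : Int) (pvAltScan (M : Int) (N : Int) (tdView cols)) (tdView cols) =
      tdView (altNewCols (M : Int) (N : Int) (altMarked (M : Int) (N : Int) cols) cols) := by
  have htd : (tdView cols).length = N := by simp [tdView, hInv.1]
  apply List.ext_getElem
  · rw [altStep_length]
    simp [tdView, newCols_length]
  · intro j hj1 hj2
    have hjN : j < N := by
      rw [altStep_length] at hj1
      omega
    rw [altStep_get (M : Int) _ (tdView cols) htd j hjN]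
    have hjc : j < cols.length := by rw [hInv.1]; exact hjN
    have htdj : (tdView cols)[j]'(by rw [htd]; exact hjN) = (cols[j]'hjc).reverse := by
      simp [tdView]
    have hrhs : (tdView (altNewCols (M : Int) (N : Int) (altMarked (M : Int) (N : Int) cols) cols))[j]'hj2 =
        ((altNewCols (M : Int) (N : Int) (altMarked (M : Int) (N : Int) cols) cols)[j]'(by
          rw [newCols_length]; omega)).reverse := by
      simp [tdView]
    rw [hrhs, newCols_get (M : Int) _ cols j hjN]
    rw [getElem_nat_pyGet cols j hjc, Option.getD_some]
    have hLM : (cols[j]'hjc).length ≤ M := (hInv.2 _ (List.getElem_mem hjc)).1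
    -- rewrite both the td column and its length through the reverse view
    have hcong : ∀ kc : Int × Char,
        (if PySem.Set.contains (pvAltScan (M : Int) (N : Int) (tdView cols))
            (kc.1 + ((M : Int) - (((tdView cols)[j]'(by rw [htd]; exact hjN)).length : Int)), (j : Int))
          then (none : Option Char) else some kc.2) =
        (if PySem.Set.contains (pvAltScan (M : Int) (N : Int) (tdView cols))
            (kc.1 + ((M : Int) - ((cols[j]'hjc).length : Int)), (j : Int))
          then (none : Option Char) else some kc.2) := by
      intro kc
      rw [htdj]
      simp
    rw [List.filterMap_congr (by intro kc _; exact hcong kc)]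
    rw [htdj]
    apply filterMap_enumerate_reverse (cols[j]'hjc)
      (fun t => PySem.Set.contains (pvAltScan (M : Int) (N : Int) (tdView cols))
        (t + ((M : Int) - ((cols[j]'hjc).length : Int)), (j : Int)))
      (fun k => altMarkAt (altMarked (M : Int) (N : Int) cols) ((M : Int) - 1 - k) (j : Int))
      0 0
    intro k hk
    set L := (cols[j]'hjc).length with hL
    -- row index of bottom-up position L-1-k (= top-down position k)
    have hrow : (0 : Int) + (L : Int) - 1 - (k : Int) = ((L - 1 - k : Nat) : Int) := by omega
    have hrow2 : (M : Int) - 1 - ((L - 1 - k : Nat) : Int) = ((M - L + k : Nat) : Int) := by omega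
    have hcell : (0 : Int) + (k : Int) + ((M : Int) - (L : Int)) = ((M - L + k : Nat) : Int) := by
      omega
    rw [hrow, hrow2, hcell]
    rw [markAt_eq cols (M - L + k) j (by omega) hjN]
    exact contains_scan_eq cols (M - L + k) j (by omega) hjN

-- ---- the invariant survives a round ----

theorem newCols_inv {M N : Nat} (cols : List (List Char)) (hInv : colsInvB M N cols)
    (marked : List (List Bool)) :
    colsInvB M N (altNewCols (M : Int) (N : Int) marked cols) := by
  constructor
  · rw [newCols_length]; simp
  · intro col' hc
    simp only [altNewCols, List.mem_map] at hc
    obtain ⟨j, _, hcol'⟩ := hc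
    set colx := (PySem.List.pyGet? cols j).getD [] with hcolx
    have hsub : ∀ c ∈ col', c ∈ colx := by
      intro c hcmem
      rw [← hcol'] at hcmem
      simp only [List.mem_filterMap] at hcmem
      obtain ⟨kc, hkc, hsel⟩ := hcmem
      have : c = kc.2 := by
        by_cases hP : altMarkAt marked ((M : Int) - 1 - kc.1) j
        · rw [if_pos hP] at hsel; exact absurd hsel (by simp)
        · rw [if_neg hP] at hsel; exact ((Option.some.injEq _ _).mp hsel).symm
      subst this
      rw [PySem.List.mem_enumerate_iff] at hkc
      obtain ⟨k, hk, rfl⟩ := hkc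
      exact List.getElem_mem hk
    have hXcolx : 'X' ∉ colx ∧ colx.length ≤ M := by
      cases hpg : PySem.List.pyGet? cols j with
      | none => simp [hcolx, hpg]
      | some cc =>
        have := PySem.List.mem_of_pyGet?_eq_some _ hpg
        rw [hcolx, hpg]
        exact ⟨(hInv.2 cc this).2, (hInv.2 cc this).1⟩
    constructor
    · calc col'.length ≤ (PySem.List.enumerate colx).length := by
            rw [← hcol']; exact List.length_filterMap_le _ _
        _ = colx.length := PySem.List.length_enumerate _ _
        _ ≤ M := hXcolx.2
    · intro hX
      exact hXcolx.1 (hsub _ hX)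

-- ---- one round of A equals one round of B; the loop follows by fuel induction ----

theorem cascade_succ (m n : Int) (fuel : Nat) (cols : List (List Char)) :
    altCascade m n (fuel + 1) cols =
      if altRemoved (altMarked m n cols) = 0 then 0
      else altRemoved (altMarked m n cols) +
        altCascade m n fuel (altNewCols m n (altMarked m n cols) cols) := rfl

theorem loop_eq {M N : Nat} (fuel : Nat) :
    ∀ (cols : List (List Char)) (ans : Int), colsInvB M N cols →
    pvLoopA (M : Int) (N : Int) fuel (render M (tdView cols)) ans =
      ans + altCascade (M : Int) (N : Int) fuel cols := by
  induction fuel with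
  | zero => intro cols ans _; simp [pvLoopA, altCascade]
  | succ fuel ih =>
    intro cols ans hInv
    have hTd := colsInv_tdView cols hInv
    have hA : pvLoopA (M : Int) (N : Int) (fuel + 1) (render M (tdView cols)) ans =
        (if (pvScan (M : Int) (N : Int) (render M (tdView cols))).1 then
          pvLoopA (M : Int) (N : Int) fuel
            (blockMarking (pvScan (M : Int) (N : Int) (render M (tdView cols))).2
              (render M (tdView cols)))
            (ans + PySem.Set.len (pvScan (M : Int) (N : Int) (render M (tdView cols))).2)
        else ans) := rfl
    rw [hA, cascade_succ, scan_flag, scan_set_eq (tdView cols) hTd, removed_eq_len cols]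
    set S := pvAltScan (M : Int) (N : Int) (tdView cols) with hS
    have hlen : PySem.Set.len S = (S.length : Int) := by simp [PySem.Set.len]
    by_cases hE : S.isEmpty
    · have h0 : PySem.Set.len S = 0 := by
        rw [hlen]
        simp [List.isEmpty_iff.mp hE]
      rw [if_neg (by simp [hE]), if_pos h0]
      omega
    · have hne : S ≠ [] := by simpa [List.isEmpty_iff] using hE
      have h0 : PySem.Set.len S ≠ 0 := by
        rw [hlen]
        have : 0 < S.length := List.length_pos_iff.mpr hne
        omega
      rw [if_pos (by simp [hE]), if_neg h0]
      obtain ⟨p, hp⟩ := List.exists_mem_of_ne_nil _ hne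
      have hb := altScan_bounds (M : Int) (N : Int) (tdView cols) p hp
      have hM : 1 ≤ M := by omega
      have hN : 1 ≤ N := by omega
      rw [step_eq (tdView cols) hTd hM hN _ (altScan_bounds (M : Int) (N : Int) (tdView cols))]
      rw [← hS, newCols_bridge cols hInv]
      rw [ih _ _ (newCols_inv cols hInv _)]
      ring

-- ---- the initial columns built by B, and A's initial grid ----

def bu0E (m n : Int) (board : List String) : List (List Char) :=
  pvZipT ((PySem.List.pyRange (m - 1) (-1) (-1)).map (fun i =>
    PySem.List.slice ((PySem.List.pyGet? board i).getD "").toList none (some n)))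

theorem solution_alt_eq (m n : Int) (board : List String) :
    solution_alt m n board = altCascade m n (m.toNat * n.toNat + 1) (bu0E m n board) := rfl

def bu0 (board : List String) (M N : Nat) : List (List Char) :=
  (List.range N).map (fun j => (List.range M).map (fun k => pvBCell board (M - 1 - k) j))

theorem pyRange_down (m : Int) (hm : 0 ≤ m) :
    PySem.List.pyRange (m - 1) (-1) (-1) = (List.range m.toNat).map (fun k : Nat => m - 1 - (k : Int)) := by
  rw [PySem.List.pyRange_neg_one]
  have : (m - 1 - (-1)).toNat = m.toNat := by omega
  rw [this]

theorem bu0E_rows (m n : Int) (board : List String) (hm0 : 0 ≤ m) (hn0 : 0 ≤ n)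
    (hmle : m ≤ (board.length : Int)) :
    (PySem.List.pyRange (m - 1) (-1) (-1)).map (fun i =>
      PySem.List.slice ((PySem.List.pyGet? board i).getD "").toList none (some n)) =
    (List.range m.toNat).map (fun k =>
      (board.getD (m.toNat - 1 - k) "").toList.take n.toNat) := by
  rw [pyRange_down m hm0, List.map_map]
  apply List.map_congr_left
  intro k hk
  rw [List.mem_range] at hk
  simp only [Function.comp_apply]
  have hb : m.toNat - 1 - k < board.length := by omega
  have hcast : m - 1 - (k : Int) = ((m.toNat - 1 - k : Nat) : Int) := by omega
  rw [hcast, getElem_nat_pyGet board _ hb, Option.getD_some, PySem.List.slice_to _ hn0,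
      List.getD_eq_getElem board _ hb]

theorem bu0E_spec (board : List String) (M N : Nat) (hM1 : 1 ≤ M) (hM : board.length = M)
    (hrows : ∀ r ∈ board, r.toList.length = N) :
    bu0E (M : Int) (N : Int) board = bu0 board M N := by
  unfold bu0E
  rw [bu0E_rows (M : Int) (N : Int) board (by omega) (by omega) (by omega)]
  simp only [Int.toNat_natCast]
  have hlen : ∀ k, k < M → (board.getD (M - 1 - k) "").toList.length = N := by
    intro k hk
    have hb : M - 1 - k < board.length := by omega
    rw [List.getD_eq_getElem board _ hb]
    exact hrows _ (List.getElem_mem hb)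
  have htake : ∀ k, k < M →
      (board.getD (M - 1 - k) "").toList.take N = (board.getD (M - 1 - k) "").toList := by
    intro k hk
    apply List.take_of_length_le
    rw [hlen k hk]
  have hsh : gShape M N ((List.range M).map (fun k =>
      (board.getD (M - 1 - k) "").toList.take N)) := by
    constructor
    · simp
    · intro r hr
      simp only [List.mem_map, List.mem_range] at hr
      obtain ⟨k, hk, rfl⟩ := hr
      rw [htake k hk]
      exact hlen k hk
  rw [zipT_rect M N _ hsh hM1]
  unfold bu0
  apply List.map_congr_left
  intro j hj
  rw [List.mem_range] at hj
  rw [List.map_map]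
  apply List.map_congr_left
  intro k hk
  rw [List.mem_range] at hk
  simp only [Function.comp_apply]
  rw [htake k hk]
  rfl

theorem bu0_inv (board : List String) (M N : Nat) (hM : board.length = M)
    (hrows : ∀ r ∈ board, r.toList.length = N) (hX : ∀ r ∈ board, 'X' ∉ r.toList) :
    colsInvB M N (bu0 board M N) := by
  constructor
  · simp [bu0]
  · intro col hcol
    simp only [bu0, List.mem_map] at hcol
    obtain ⟨j, hj, rfl⟩ := hcol
    rw [List.mem_range] at hj
    refine ⟨by simp, ?_⟩
    intro hXin
    simp only [List.mem_map, List.mem_range] at hXin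
    obtain ⟨k, hk, heq⟩ := hXin
    have hb : M - 1 - k < board.length := by omega
    have hjr : j < (board[M - 1 - k]'hb).toList.length := by
      rw [hrows _ (List.getElem_mem hb)]
      exact hj
    have : pvBCell board (M - 1 - k) j = (board[M - 1 - k]'hb).toList[j]'hjr := by
      unfold pvBCell
      rw [List.getD_eq_getElem board _ hb, List.getD_eq_getElem _ _ hjr]
    rw [this] at heq
    exact hX _ (List.getElem_mem hb) (heq ▸ List.getElem_mem hjr)

theorem tdView_bu0 (board : List String) (M N : Nat) (hM : board.length = M) :
    tdView (bu0 board M N) = (List.range N).map (fun j =>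
      (board.map String.toList).map (fun r => r.getD j '?')) := by
  unfold tdView bu0
  rw [List.map_map]
  apply List.map_congr_left
  intro j hj
  rw [List.mem_range] at hj
  simp only [Function.comp_apply]
  apply List.ext_getElem
  · simp [hM]
  · intro i hi1 hi2
    have hiM : i < M := by simpa using hi1
    have hib : i < board.length := by omega
    rw [List.getElem_reverse]
    simp only [List.length_map, List.length_range, List.getElem_map, List.getElem_range]
    have : M - 1 - (M - 1 - i) = i := by omega
    rw [this]
    unfold pvBCell
    rw [List.getD_eq_getElem board _ hib]

theorem init_render (board : List String) (M N : Nat)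
    (hM : board.length = M) (hrows : ∀ r ∈ board, r.toList.length = N) :
    render M ((List.range N).map (fun j =>
      (board.map String.toList).map (fun r => r.getD j '?'))) =
    board.map String.toList := by
  apply List.ext_getElem
  · simp [render, hM]
  · intro i hi1 hi2
    have hiM : i < M := by simpa [render] using hi1
    have hib : i < board.length := by omega
    rw [render_row _ i hiM, List.getElem_map]
    apply List.ext_getElem
    · simp [hrows _ (List.getElem_mem hib)]
    · intro j hj1 hj2
      have hjN : j < N := by simpa using hj1
      simp only [List.getElem_map, List.getElem_range]
      have hcl : ((board.map String.toList).map (fun r => r.getD j '?')).length = M := by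
        simp [hM]
      simp only [rcell, hcl, Nat.sub_self, Nat.not_lt_zero, if_false, Nat.sub_zero]
      have hil : i < ((board.map String.toList).map (fun r => r.getD j '?')).length := by
        rw [hcl]; exact hiM
      rw [List.getD_eq_getElem _ _ hil]
      simp only [List.getElem_map]
      have hjl : j < (board[i]).toList.length := by
        rw [hrows _ (List.getElem_mem hib)]; exact hjN
      rw [List.getD_eq_getElem _ _ hjl]

-- ---- the no-match region of Pre_: both programs stop in the first round ----

theorem bcell_of_bounds (m n : Int) (board : List String)
    (hmle : m ≤ (board.length : Int))
    (hnle : ∀ r ∈ board.take m.toNat, n ≤ (r.toList.length : Int))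
    (a b : Nat) (ha : (a : Int) < m) (hb : (b : Int) < n) :
    b < ((board[a]'(by omega)).toList).length := by
  have hab : a < board.length := by omega
  have hmem : board[a] ∈ board.take m.toNat := by
    have hatk : a < (board.take m.toNat).length := by simp; omega
    have heq : (board.take m.toNat)[a] = board[a] := List.getElem_take
    rw [← heq]
    exact List.getElem_mem hatk
  have hblen := hnle _ hmem
  omega

theorem cellA_nomatch (m n : Int) (board : List String)
    (hmle : m ≤ (board.length : Int))
    (hnle : ∀ r ∈ board.take m.toNat, n ≤ (r.toList.length : Int))
    (a b : Nat) (ha : (a : Int) < m) (hb : (b : Int) < n) :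
    pvCellA (board.map String.toList) (a : Int) (b : Int) = pvBCell board a b := by
  have hab : a < board.length := by omega
  have h3 := bcell_of_bounds m n board hmle hnle a b ha hb
  unfold pvCellA pvBCell
  have hab2 : a < (board.map String.toList).length := by simpa using hab
  rw [getElem_nat_pyGet _ a hab2, Option.getD_some, List.getElem_map]
  rw [getElem_nat_pyGet _ b h3, Option.getD_some, List.getD_eq_getElem _ _ hab,
      List.getD_eq_getElem _ _ h3]

theorem scanA_nomatch (m n : Int) (board : List String)
    (hmle : m ≤ (board.length : Int))
    (hnle : ∀ r ∈ board.take m.toNat, n ≤ (r.toList.length : Int))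
    (hnm : pvNoMatch m n board) :
    pvScan m n (board.map String.toList) = (false, PySem.Set.empty) := by
  unfold pvScan
  refine List.foldlRecOn (motive := fun st : Bool × PySem.Set (Int × Int) =>
    st = (false, PySem.Set.empty)) _ _ rfl ?_
  intro st hst i hi
  rw [PySem.List.mem_pyRange_one] at hi
  refine List.foldlRecOn (motive := fun st : Bool × PySem.Set (Int × Int) =>
    st = (false, PySem.Set.empty)) _ _ hst ?_
  intro st' hst' j hj
  rw [PySem.List.mem_pyRange_one] at hj
  obtain ⟨a, rfl⟩ : ∃ a : Nat, i = (a : Int) := ⟨i.toNat, by omega⟩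
  obtain ⟨b, rfl⟩ : ∃ b : Nat, j = (b : Int) := ⟨j.toNat, by omega⟩
  have e1 : ((a : Int) + 1) = ((a + 1 : Nat) : Int) := by push_cast; ring
  have e2 : ((b : Int) + 1) = ((b + 1 : Nat) : Int) := by push_cast; ring
  rw [if_neg ?_]
  · exact hst'
  rw [e1, e2, cellA_nomatch m n board hmle hnle a b (by omega) (by omega),
      cellA_nomatch m n board hmle hnle a (b + 1) (by omega) (by push_cast; omega),
      cellA_nomatch m n board hmle hnle (a + 1) b (by push_cast; omega) (by omega),
      cellA_nomatch m n board hmle hnle (a + 1) (b + 1) (by push_cast; omega) (by push_cast; omega)]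
  intro hc
  exact hnm a (by omega) b (by omega) ⟨hc.2.1, hc.2.2.1, hc.2.2.2⟩

theorem altAt0 (m n : Int) (board : List String)
    (hmle : m ≤ (board.length : Int))
    (hnle : ∀ r ∈ board.take m.toNat, n ≤ (r.toList.length : Int))
    (i j : Int) (hi0 : 0 ≤ i) (hi : i < m) (hj0 : 0 ≤ j) (hj : j < n) :
    altAt m (bu0E m n board) i j = some (pvBCell board i.toNat j.toNat) := by
  have hrowlen : ∀ k, k < m.toNat → n ≤ ((board.getD (m.toNat - 1 - k) "").toList.length : Int) := by
    intro k hk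
    have hb : m.toNat - 1 - k < board.length := by omega
    rw [List.getD_eq_getElem board _ hb]
    apply hnle
    have hatk : m.toNat - 1 - k < (board.take m.toNat).length := by simp; omega
    have heq : (board.take m.toNat)[m.toNat - 1 - k] = board[m.toNat - 1 - k]'hb :=
      List.getElem_take
    rw [← heq]
    exact List.getElem_mem hatk
  unfold altAt bu0E
  rw [bu0E_rows m n board (by omega) (by omega) hmle]
  have hsh : gShape m.toNat n.toNat ((List.range m.toNat).map (fun k =>
      (board.getD (m.toNat - 1 - k) "").toList.take n.toNat)) := by
    constructor
    · simp
    · intro r hr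
      simp only [List.mem_map, List.mem_range] at hr
      obtain ⟨k, hk, rfl⟩ := hr
      rw [List.length_take]
      have := hrowlen k hk
      omega
  rw [zipT_rect m.toNat n.toNat _ hsh (by omega)]
  obtain ⟨J, rfl⟩ : ∃ J : Nat, j = (J : Int) := ⟨j.toNat, by omega⟩
  obtain ⟨I, rfl⟩ : ∃ I : Nat, i = (I : Int) := ⟨i.toNat, by omega⟩
  simp only [Int.toNat_natCast]
  have hJ : J < n.toNat := by omega
  have hI : I < m.toNat := by omega
  rw [getElem_nat_pyGet _ J (by simp; omega), Option.getD_some]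
  simp only [List.getElem_map, List.getElem_range, List.length_map, List.length_range]
  rw [if_pos (by omega)]
  have hidx : m - 1 - (I : Int) = ((m.toNat - 1 - I : Nat) : Int) := by omega
  rw [hidx, getElem_nat_pyGet _ (m.toNat - 1 - I) (by simp; omega)]
  simp only [List.getElem_map, List.getElem_range]
  have hback : m.toNat - 1 - (m.toNat - 1 - I) = I := by omega
  rw [hback]
  have hb : I < board.length := by omega
  have hjr : J < (board.getD I "").toList.length := by
    have := hrowlen (m.toNat - 1 - I) (by omega)
    rw [hback] at this
    omega
  congr 1
  have htk : J < ((board.getD I "").toList.take n.toNat).length := by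
    rw [List.length_take]
    omega
  rw [List.getD_eq_getElem _ _ htk, List.getElem_take]
  unfold pvBCell
  rw [List.getD_eq_getElem _ _ hjr]

theorem doomed0 (m n : Int) (board : List String)
    (hmle : m ≤ (board.length : Int))
    (hnle : ∀ r ∈ board.take m.toNat, n ≤ (r.toList.length : Int))
    (hnm : pvNoMatch m n board)
    (i j : Int) (hi0 : 0 ≤ i) (hi : i < m) (hj0 : 0 ≤ j) (hj : j < n) :
    altDoomed m n (bu0E m n board) i j = false := by
  cases hd : altDoomed m n (bu0E m n board) i j with
  | false => rfl
  | true =>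
    exfalso
    unfold altDoomed at hd
    rw [altAt0 m n board hmle hnle i j hi0 hi hj0 hj] at hd
    simp only [List.any_eq_true, List.mem_cons, List.not_mem_nil, or_false,
      Bool.and_eq_true, decide_eq_true_eq, beq_iff_eq] at hd
    obtain ⟨a, ha, b, hb, ⟨⟨⟨⟨⟨⟨h0a, h1a⟩, h0b⟩, h1b⟩, e1⟩, e2⟩, e3⟩, e4⟩ := hd
    rw [altAt0 m n board hmle hnle a b h0a (by omega) h0b (by omega),
        altAt0 m n board hmle hnle a (b + 1) h0a (by omega) (by omega) (by omega)] at e1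
    rw [altAt0 m n board hmle hnle a (b + 1) h0a (by omega) (by omega) (by omega),
        altAt0 m n board hmle hnle (a + 1) b (by omega) (by omega) h0b (by omega)] at e2
    rw [altAt0 m n board hmle hnle (a + 1) b (by omega) (by omega) h0b (by omega),
        altAt0 m n board hmle hnle (a + 1) (b + 1) (by omega) (by omega) (by omega) (by omega)] at e3
    have f1 : pvBCell board a.toNat b.toNat = pvBCell board a.toNat (b + 1).toNat :=
      (Option.some.injEq _ _).mp e1
    have f2 : pvBCell board a.toNat (b + 1).toNat = pvBCell board (a + 1).toNat b.toNat :=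
      (Option.some.injEq _ _).mp e2
    have f3 : pvBCell board (a + 1).toNat b.toNat = pvBCell board (a + 1).toNat (b + 1).toNat :=
      (Option.some.injEq _ _).mp e3
    have ca : (a + 1).toNat = a.toNat + 1 := by omega
    have cb : (b + 1).toNat = b.toNat + 1 := by omega
    rw [cb] at f1
    rw [ca, cb] at f2
    rw [ca, cb] at f3
    exact hnm a.toNat (by omega) b.toNat (by omega)
      ⟨f1, f1.trans f2, (f1.trans f2).trans f3⟩

theorem removed0 (m n : Int) (board : List String)
    (hmle : m ≤ (board.length : Int))
    (hnle : ∀ r ∈ board.take m.toNat, n ≤ (r.toList.length : Int))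
    (hnm : pvNoMatch m n board) :
    altRemoved (altMarked m n (bu0E m n board)) = 0 := by
  unfold altRemoved altMarked
  apply List.sum_eq_zero
  intro x hx
  simp only [List.mem_map] at hx
  obtain ⟨row, ⟨i, hi, rfl⟩, rfl⟩ := hx
  rw [PySem.List.mem_pyRange_one] at hi
  apply List.sum_eq_zero
  intro y hy
  simp only [List.mem_map] at hy
  obtain ⟨b, ⟨j, hj, rfl⟩, rfl⟩ := hy
  rw [PySem.List.mem_pyRange_one] at hj
  rw [doomed0 m n board hmle hnle hnm i j hi.1 hi.2 hj.1 hj.2]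
  rfl

-- ---- the main equivalence ----

theorem solution_eq_alt (m n : Int) (board : List String) (hpre : Pre_solution m n board) :
    solution m n board = solution_alt m n board := by
  rcases hpre with ⟨hm, hrows, hX⟩ | ⟨hmle, hnle, hnm⟩
  case inr =>
    have hA0 := scanA_nomatch m n board hmle hnle hnm
    have hAstep : solution m n board =
        (if (pvScan m n (board.map String.toList)).1 then
          pvLoopA m n (m.toNat * n.toNat)
            (blockMarking (pvScan m n (board.map String.toList)).2 (board.map String.toList))
            (0 + PySem.Set.len (pvScan m n (board.map String.toList)).2)
        else 0) := rfl
    rw [hAstep, hA0]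
    rw [solution_alt_eq, cascade_succ, removed0 m n board hmle hnle hnm]
    simp
  case inl =>
    cases board with
    | nil =>
      have hm0 : m = 0 := by simpa using hm.symm
      subst hm0
      show pvLoopA 0 n (Int.toNat 0 * n.toNat + 1) _ 0 = _
      rw [solution_alt_eq]
      have hA : pvLoopA 0 n (Int.toNat 0 * n.toNat + 1) (([] : List String).map String.toList) 0 = 0 := by
        simp [pvLoopA, pvScan, PySem.List.pyRange_one_eq_nil (by omega : (0 : Int) - 1 ≤ 0),
          PySem.Set.empty]
      have hB : altCascade 0 n (Int.toNat 0 * n.toNat + 1) (bu0E 0 n ([] : List String)) = 0 := by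
        rw [cascade_succ]
        have h0 : altRemoved (altMarked 0 n (bu0E 0 n ([] : List String))) = 0 := by
          unfold altRemoved altMarked
          rw [show PySem.List.pyRange 0 (0 : Int) = [] from
            PySem.List.pyRange_one_eq_nil (by omega)]
          rfl
        rw [h0]
        rfl
      rw [hB]
      exact hA
    | cons r0 rest =>
      have hn0 : 0 ≤ n := by
        have := hrows r0 (by simp)
        omega
      have hN : ((n.toNat : Nat) : Int) = n := Int.toNat_of_nonneg hn0
      have hMv : (((r0 :: rest).length : Nat) : Int) = m := hm
      set M := (r0 :: rest).length with hMdef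
      set N := n.toNat with hNdef
      have hrowsN : ∀ r ∈ r0 :: rest, r.toList.length = N := by
        intro r hr
        have := hrows r hr
        omega
      have hInv := bu0_inv (r0 :: rest) M N rfl hrowsN hX
      show pvLoopA m n (m.toNat * n.toNat + 1) ((r0 :: rest).map String.toList) 0 = _
      rw [solution_alt_eq, ← hMv, ← hN]
      rw [bu0E_spec (r0 :: rest) M N (by simp [hMdef]) rfl hrowsN]
      have hgrid : (r0 :: rest).map String.toList = render M (tdView (bu0 (r0 :: rest) M N)) := by
        rw [tdView_bu0 (r0 :: rest) M N rfl, init_render (r0 :: rest) M N rfl hrowsN]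
      rw [hgrid]
      have hfuel : ((M : Int)).toNat * ((N : Int)).toNat + 1 = M * N + 1 := by simp
      rw [hfuel, loop_eq (M * N + 1) (bu0 (r0 :: rest) M N) 0 hInv]
      omega

-- ===== VERDICT (by name: the statement is the Claim_ definition above) =====
theorem solution_spec : Claim_equal_solution := by
  intro m n board _ hpre
  show solution m n board = solution_alt m n board
  exact solution_eq_alt m n board hpre
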